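-- pv_equiv track=rewrite | github.com/Protonk/sandbox-boostrap | status/experiments/scripts/analyze_experiments.py | extract_deliverables_lines
-- ===== SOURCE A (Python) =====
-- def extract_deliverables_lines(plan_text: str):
--     lines = plan_text.splitlines()
--     deliverables_blocks = []
--     in_block = False
--     current_block = []
--
--     for line in lines:
--         stripped = line.strip()
--         # Start of a deliverables section
--         if stripped.lower().startswith("deliverables"):
--             # flush existing
--             if current_block:
--                 deliverables_blocks.append(current_block)
--                 current_block = []
--             in_block = True
--             # we keep the line itself too
--             current_block.append(line)
--             continue
--
--         if in_block:
--             # stop on blank line or a new top-level heading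
--             if stripped == "" or stripped.startswith("#"):
--                 in_block = False
--                 if current_block:
--                     deliverables_blocks.append(current_block)
--                     current_block = []
--                 continue
--             current_block.append(line)
--
--     if current_block:
--         deliverables_blocks.append(current_block)
--
--     # flatten blocks into a single list of non-empty, non-heading lines
--     flat = []
--     for block in deliverables_blocks:
--         for line in block:
--             if line.strip() and not line.lstrip().startswith("#"):
--                 flat.append(line.rstrip())
--     return flat
-- ===== SOURCE B (Python) =====
-- def extract_deliverables_lines(plan_text: str):
--     flat = []
--     in_block = False
--     for line in plan_text.splitlines():
--         stripped = line.strip()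
--         if stripped.lower().startswith("deliverables"):
--             in_block = True
--             flat.append(line.rstrip())
--         elif in_block:
--             if stripped == "" or stripped.startswith("#"):
--                 in_block = False
--             else:
--                 flat.append(line.rstrip())
--     return flat
-- ===== Notes on version B (the rewrite author's own statement) =====
-- stated objective: simpler
-- what changed: Replaces the two-phase design (accumulate a list of deliverables blocks, then a second nested pass that filters and flattens them) with a single pass keeping only an in_block flag and the output list, emitting each kept line rstripped immediately; the block list and the flatten/filter pass disappear.
import Mathlib
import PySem

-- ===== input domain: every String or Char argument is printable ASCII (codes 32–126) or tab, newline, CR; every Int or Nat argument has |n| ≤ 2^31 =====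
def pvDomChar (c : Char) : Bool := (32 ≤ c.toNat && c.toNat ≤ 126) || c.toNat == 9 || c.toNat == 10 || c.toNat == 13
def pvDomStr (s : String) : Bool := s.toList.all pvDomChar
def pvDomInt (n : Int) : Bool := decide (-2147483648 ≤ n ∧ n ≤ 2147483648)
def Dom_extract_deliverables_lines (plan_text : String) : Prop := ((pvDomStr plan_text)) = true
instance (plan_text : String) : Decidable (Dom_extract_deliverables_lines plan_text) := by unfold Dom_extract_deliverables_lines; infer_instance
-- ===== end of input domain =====

-- B does the same extraction in one pass (in_block flag + output list), dropping A's
-- intermediate list of blocks and its second filter/flatten pass.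

-- ===== PORT A =====
def extract_deliverables_lines (plan_text : String) : List String :=
  let lines := PySem.Str.splitlines plan_text
  let st := lines.foldl
    (fun (st : List (List String) × Bool × List String) line =>
      let stripped := PySem.Str.strip line
      if PySem.Str.startswith (PySem.Str.lower stripped) "deliverables" then
        ((if st.2.2 ≠ [] then st.1 ++ [st.2.2] else st.1), true, [line])
      else if st.2.1 then
        if stripped == "" || PySem.Str.startswith stripped "#" then
          ((if st.2.2 ≠ [] then st.1 ++ [st.2.2] else st.1), false, ([] : List String))
        else (st.1, st.2.1, st.2.2 ++ [line])
      else st)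
    ([], false, [])
  let blocks := if st.2.2 ≠ [] then st.1 ++ [st.2.2] else st.1
  blocks.foldl
    (fun flat block =>
      block.foldl
        (fun flat line =>
          if PySem.Str.strip line != "" && !PySem.Str.startswith (PySem.Str.lstrip line) "#" then
            flat ++ [PySem.Str.rstrip line]
          else flat)
        flat)
    []

-- ===== PORT B =====
def extract_deliverables_lines_alt (plan_text : String) : List String :=
  ((PySem.Str.splitlines plan_text).foldl
    (fun (st : Bool × List String) line =>
      let stripped := PySem.Str.strip line
      if PySem.Str.startswith (PySem.Str.lower stripped) "deliverables" then
        (true, st.2 ++ [PySem.Str.rstrip line])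
      else if st.1 then
        if stripped == "" || PySem.Str.startswith stripped "#" then (false, st.2)
        else (st.1, st.2 ++ [PySem.Str.rstrip line])
      else st)
    (false, [])).2

-- ===== PRECONDITION & SPEC =====
def Spec_extract_deliverables_lines (plan_text : String) (out : List String) : Prop := out = extract_deliverables_lines_alt plan_text
instance (plan_text : String) (out : List String) : Decidable (Spec_extract_deliverables_lines plan_text out) := by unfold Spec_extract_deliverables_lines; infer_instance

-- ===== CLAIM (what is proved, stated in full; the proofs are below) =====
def Claim_equal_extract_deliverables_lines : Prop := ∀ (plan_text : String), Dom_extract_deliverables_lines plan_text → Spec_extract_deliverables_lines plan_text (extract_deliverables_lines plan_text)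

-- ===== LEMMAS AND PROOFS =====

-- A's flatten predicate: the line is kept iff its strip is non-empty and its lstrip does not start with '#'
def pvP (line : String) : Bool :=
  PySem.Str.strip line != "" && !PySem.Str.startswith (PySem.Str.lstrip line) "#"

-- what A's second pass produces from one block
def pvF (block : List String) : List String := (block.filter pvP).map PySem.Str.rstrip

-- A's per-line step
def pvStepA (st : List (List String) × Bool × List String) (line : String) :
    List (List String) × Bool × List String :=
  let stripped := PySem.Str.strip line
  if PySem.Str.startswith (PySem.Str.lower stripped) "deliverables" then
    ((if st.2.2 ≠ [] then st.1 ++ [st.2.2] else st.1), true, [line])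
  else if st.2.1 then
    if stripped == "" || PySem.Str.startswith stripped "#" then
      ((if st.2.2 ≠ [] then st.1 ++ [st.2.2] else st.1), false, ([] : List String))
    else (st.1, st.2.1, st.2.2 ++ [line])
  else st

-- B's per-line step
def pvStepB (st : Bool × List String) (line : String) : Bool × List String :=
  let stripped := PySem.Str.strip line
  if PySem.Str.startswith (PySem.Str.lower stripped) "deliverables" then
    (true, st.2 ++ [PySem.Str.rstrip line])
  else if st.1 then
    if stripped == "" || PySem.Str.startswith stripped "#" then (false, st.2)
    else (st.1, st.2 ++ [PySem.Str.rstrip line])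
  else st

-- the strip of a string is a prefix of its lstrip
theorem pv_strip_prefix_lstrip (cs : List Char) :
    PySem.Chars.strip cs <+: PySem.Chars.lstrip cs := by
  obtain ⟨t, ht⟩ := List.dropWhile_suffix (l := (PySem.Chars.lstrip cs).reverse) PySem.Chars.isspace
  refine ⟨t.reverse, ?_⟩
  simp only [PySem.Chars.strip, PySem.Chars.rstrip]
  rw [← List.reverse_append, ht, List.reverse_reverse]

theorem pv_lstrip_head (cs : List Char) (c : Char) (cs' : List Char)
    (h : PySem.Chars.strip cs = c :: cs') : ∃ t, PySem.Chars.lstrip cs = c :: t := by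
  obtain ⟨t, ht⟩ := pv_strip_prefix_lstrip cs
  exact ⟨cs' ++ t, by rw [← ht, h]; simp⟩

-- a non-blank line whose strip does not start with '#' passes A's flatten filter
theorem pvP_of_head (line : String) (c : Char) (cs' : List Char)
    (hs : PySem.Chars.strip line.toList = c :: cs') (hc : c ≠ '#') :
    pvP line = true := by
  obtain ⟨t', ht'⟩ := pv_lstrip_head line.toList c cs' hs
  simp only [pvP, Bool.and_eq_true, bne_iff_ne, ne_eq, Bool.not_eq_true']
  refine ⟨?_, ?_⟩
  · rw [← String.toList_inj]
    simp [PySem.Str.toList_strip, hs]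
  · rw [PySem.Str.startswith_eq, PySem.Str.toList_lstrip, ht']
    simp [PySem.Chars.startswith, List.isPrefixOf,
      show ("#" : String).toList = ['#'] from rfl, Ne.symm hc]

-- a header line ("deliverables…") passes A's flatten filter
theorem pvP_of_deliv (line : String)
    (h : PySem.Str.startswith (PySem.Str.lower (PySem.Str.strip line)) "deliverables" = true) :
    pvP line = true := by
  rw [PySem.Str.startswith_eq, PySem.Str.toList_lower, PySem.Str.toList_strip,
    PySem.Chars.startswith_iff] at h
  obtain ⟨t, ht⟩ := h
  have hh : (PySem.Chars.lower (PySem.Chars.strip line.toList)).head? = some 'd' := by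
    rw [← ht]; rfl
  cases hs : PySem.Chars.strip line.toList with
  | nil => rw [hs] at hh; simp [PySem.Chars.lower] at hh
  | cons c cs' =>
    rw [hs] at hh
    simp only [PySem.Chars.lower, List.map_cons, List.head?_cons, Option.some_inj] at hh
    refine pvP_of_head line c cs' hs ?_
    intro hce
    rw [hce] at hh
    exact absurd hh (by decide)

-- a body line kept by A's loop (non-blank, strip not starting with '#') passes A's flatten filter
theorem pvP_of_body (line : String)
    (h1 : (PySem.Str.strip line == "") = false)
    (h2 : PySem.Str.startswith (PySem.Str.strip line) "#" = false) :
    pvP line = true := by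
  cases hs : PySem.Chars.strip line.toList with
  | nil =>
    have : PySem.Str.strip line = "" := by
      rw [← String.toList_inj, PySem.Str.toList_strip, hs]; rfl
    simp [this] at h1
  | cons c cs' =>
    refine pvP_of_head line c cs' hs ?_
    intro hce
    rw [PySem.Str.startswith_eq, PySem.Str.toList_strip, hs, hce] at h2
    simp [PySem.Chars.startswith, List.isPrefixOf,
      show ("#" : String).toList = ['#'] from rfl] at h2

theorem pvF_nil : pvF [] = [] := rfl

theorem pv_flatMap_flush (blocks : List (List String)) (cur : List String) :
    ((if cur ≠ [] then blocks ++ [cur] else blocks) ++ [cur']).flatMap pvF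
      = (blocks ++ [cur]).flatMap pvF ++ pvF cur' := by
  by_cases hc : cur = [] <;> simp [hc, pvF_nil]

-- loop invariant: B's running pair tracks A's (blocks, in_block, current_block)
theorem pv_loop (lines : List String) :
    ∀ (blocks : List (List String)) (inb : Bool) (cur flat : List String),
    flat = (blocks ++ [cur]).flatMap pvF →
    lines.foldl pvStepB (inb, flat)
      = ((lines.foldl pvStepA (blocks, inb, cur)).2.1,
         ((lines.foldl pvStepA (blocks, inb, cur)).1
           ++ [(lines.foldl pvStepA (blocks, inb, cur)).2.2]).flatMap pvF) := by
  induction lines with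
  | nil => intro blocks inb cur flat hflat; simp [hflat]
  | cons line rest ih =>
    intro blocks inb cur flat hflat
    simp only [List.foldl_cons, pvStepA, pvStepB]
    by_cases hd : PySem.Str.startswith (PySem.Str.lower (PySem.Str.strip line)) "deliverables" = true
    · rw [if_pos hd, if_pos hd]
      apply ih
      rw [pv_flatMap_flush, hflat]
      simp [pvF, List.filter, pvP_of_deliv line hd]
    · rw [if_neg hd, if_neg hd]
      cases inb with
      | false =>
        rw [if_neg Bool.false_ne_true, if_neg Bool.false_ne_true]
        exact ih blocks false cur flat hflat
      | true =>
        rw [if_pos rfl, if_pos rfl]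
        by_cases hstop :
            (PySem.Str.strip line == "" || PySem.Str.startswith (PySem.Str.strip line) "#") = true
        · rw [if_pos hstop, if_pos hstop]
          apply ih
          rw [pv_flatMap_flush, hflat, pvF_nil, List.append_nil]
        · rw [if_neg hstop, if_neg hstop]
          have hp : pvP line = true := by
            simp only [Bool.or_eq_true, not_or, Bool.not_eq_true] at hstop
            exact pvP_of_body line hstop.1 hstop.2
          apply ih
          rw [hflat]
          simp [pvF, List.filter_append, List.filter, hp]

-- ===== VERDICT (by name: the statement is the Claim_ definition above) =====
theorem extract_deliverables_lines_spec : Claim_equal_extract_deliverables_lines := by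
  intro plan_text _
  unfold Spec_extract_deliverables_lines extract_deliverables_lines extract_deliverables_lines_alt
  simp only []
  rw [show (fun (st : List (List String) × Bool × List String) (line : String) =>
        let stripped := PySem.Str.strip line
        if PySem.Str.startswith (PySem.Str.lower stripped) "deliverables" then
          ((if st.2.2 ≠ [] then st.1 ++ [st.2.2] else st.1), true, [line])
        else if st.2.1 then
          if stripped == "" || PySem.Str.startswith stripped "#" then
            ((if st.2.2 ≠ [] then st.1 ++ [st.2.2] else st.1), false, ([] : List String))
          else (st.1, st.2.1, st.2.2 ++ [line])
        else st) = pvStepA from rfl]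
  rw [show (fun (st : Bool × List String) (line : String) =>
        let stripped := PySem.Str.strip line
        if PySem.Str.startswith (PySem.Str.lower stripped) "deliverables" then
          (true, st.2 ++ [PySem.Str.rstrip line])
        else if st.1 then
          if stripped == "" || PySem.Str.startswith stripped "#" then (false, st.2)
          else (st.1, st.2 ++ [PySem.Str.rstrip line])
        else st) = pvStepB from rfl]
  rw [pv_loop (PySem.Str.splitlines plan_text) [] false [] [] (by simp [pvF_nil])]
  generalize (List.foldl pvStepA ([], false, []) (PySem.Str.splitlines plan_text)) = a
  obtain ⟨blocks, inb, cur⟩ := a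
  simp only
  have hflat : ∀ (bs : List (List String)),
      bs.foldl (fun flat block =>
        block.foldl (fun flat line =>
          if PySem.Str.strip line != "" && !PySem.Str.startswith (PySem.Str.lstrip line) "#" then
            flat ++ [PySem.Str.rstrip line]
          else flat) flat) [] = bs.flatMap pvF := by
    intro bs
    have : (fun (flat : List String) (block : List String) =>
        block.foldl (fun flat line =>
          if PySem.Str.strip line != "" && !PySem.Str.startswith (PySem.Str.lstrip line) "#" then
            flat ++ [PySem.Str.rstrip line]
          else flat) flat) = (fun flat block => flat ++ pvF block) := by
      funext flat block
      exact PySem.List.foldl_append_if pvP PySem.Str.rstrip block flat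
    rw [this, PySem.List.foldl_append_eq_flatMap]
    simp
  rw [hflat]
  by_cases hc : cur = [] <;> simp [hc, pvF_nil]
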